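-- pv_equiv track=rewrite | github.com/spookybear0/laserforce_ranking | elo.py | matchmake_elo_from_elo
-- ===== SOURCE A (Python) =====
-- def matchmake_elo_from_elo(players_elo):
--     """
--     This function essentially sorts players in descending
--     order than takes pairs starting from the best
--     and splitting the best up into seperate teams
--     (uses elo instead of player object)
--     """
--
--     players_elo.sort(reverse=True)
--
--     team1 = []
--     team2 = []
--
--     i = 0
--     while i < len(players_elo):
--         team2.append(players_elo[i])
--         players_elo.pop(i)
--         try:
--             team1.append(players_elo[i])
--         except IndexError: # odd number of players
--             break
--         players_elo.pop(i)
--         i += 0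
--
--     return (team1, team2)
-- ===== SOURCE B (Python) =====
-- def matchmake_elo_from_elo(players_elo):
--     # Sort descending once, then split by slice parity: no repeated pop(0).
--     # Note: unlike A, this does not mutate the argument (A empties it); return value is identical.
--     s = sorted(players_elo, reverse=True)
--     return (s[1::2], s[::2])
-- ===== Notes on version B (the rewrite author's own statement) =====
-- stated objective: faster
-- what changed: Replaces the destructive while-loop that repeatedly pops the front of the list with a single descending sort followed by even/odd index slicing.
import Mathlib
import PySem

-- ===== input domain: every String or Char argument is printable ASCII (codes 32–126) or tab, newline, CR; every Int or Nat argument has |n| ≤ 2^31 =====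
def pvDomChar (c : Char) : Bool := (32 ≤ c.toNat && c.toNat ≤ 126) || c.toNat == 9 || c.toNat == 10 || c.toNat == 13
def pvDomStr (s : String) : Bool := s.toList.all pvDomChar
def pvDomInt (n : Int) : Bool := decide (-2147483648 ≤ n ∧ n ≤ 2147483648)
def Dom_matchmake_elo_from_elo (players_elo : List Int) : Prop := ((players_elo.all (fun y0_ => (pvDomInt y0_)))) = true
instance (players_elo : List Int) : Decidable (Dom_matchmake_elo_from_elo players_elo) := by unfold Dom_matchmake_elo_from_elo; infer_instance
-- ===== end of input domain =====

-- B replaces A's destructive pop(0) loop by one descending sort plus even/odd slicing (faster);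
-- equivalence is about the RETURN value only: A empties its argument list in place, B does not mutate it.


-- ===== PORT A =====
-- A's while loop: every iteration reads index 0, pops it into team2, then (if the list is
-- still nonempty) reads index 0 again and pops it into team1; IndexError breaks the loop.
def pvLoopA : List Int → List Int → List Int → List Int × List Int
  | [], team1, team2 => (team1, team2)
  | [x], team1, team2 => (team1, team2 ++ [x])          -- second read raises IndexError → break
  | x :: y :: rest, team1, team2 => pvLoopA rest (team1 ++ [y]) (team2 ++ [x])

def matchmake_elo_from_elo (players_elo : List Int) : List Int × List Int :=
  pvLoopA (PySem.List.sorted players_elo (fun x => x) true) [] []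

-- ===== PORT B =====
-- Source B: s = sorted(players_elo, reverse=True); return (s[1::2], s[::2])
def matchmake_elo_from_elo_alt (players_elo : List Int) : List Int × List Int :=
  let s := PySem.List.sorted players_elo (fun x => x) true
  ((PySem.List.slice? s (some 1) none 2).getD [],       -- s[1::2]; step 2 ≠ 0, never none
   (PySem.List.slice? s none none 2).getD [])           -- s[::2]

-- ===== PRECONDITION & SPEC =====
def Spec_matchmake_elo_from_elo (players_elo : List Int) (out : List Int × List Int) : Prop := out = matchmake_elo_from_elo_alt players_elo
instance (players_elo : List Int) (out : List Int × List Int) : Decidable (Spec_matchmake_elo_from_elo players_elo out) := by unfold Spec_matchmake_elo_from_elo; infer_instance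

-- ===== CLAIM (what is proved, stated in full; the proofs are below) =====
def Claim_equal_matchmake_elo_from_elo : Prop := ∀ (players_elo : List Int), Dom_matchmake_elo_from_elo players_elo → Spec_matchmake_elo_from_elo players_elo (matchmake_elo_from_elo players_elo)

-- ===== LEMMAS AND PROOFS =====

/-- The even-index sublist xs[::2]. -/
def pvEveryOther : List Int → List Int
  | [] => []
  | [x] => [x]
  | x :: _ :: r => x :: pvEveryOther r

theorem pvEveryOther_cons (a : Int) (l : List Int) :
    pvEveryOther (a :: l) = a :: pvEveryOther l.tail := by
  cases l <;> simp [pvEveryOther]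

theorem pv_filterMap_range (xs : List Int) (c : Nat) (h : c = (xs.length + 1) / 2) :
    List.filterMap (fun k => xs[2 * k]?) (List.range c) = pvEveryOther xs := by
  induction xs using pvEveryOther.induct generalizing c with
  | case1 => subst h; simp [pvEveryOther]
  | case2 x => subst h; simp [pvEveryOther]
  | case3 x y r ih =>
    have hc : c = ((r.length + 1) / 2) + 1 := by simp at h; omega
    subst hc
    rw [List.range_succ_eq_map, List.filterMap_cons, List.filterMap_map]
    have : (fun k => (x :: y :: r)[2 * k]?) ∘ Nat.succ = (fun k => r[2 * k]?) := by
      funext k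
      have : 2 * Nat.succ k = (2 * k + 1) + 1 := by omega
      simp [this]
    rw [this, ih _ rfl]
    simp [pvEveryOther]

theorem pv_slice2_all (xs : List Int) :
    PySem.List.slice? xs none none 2 = some (pvEveryOther xs) := by
  rcases xs with _ | ⟨x, t⟩
  · decide
  · simp only [PySem.List.slice?, PySem.List.sliceIndices]
    norm_num
    have hf : (fun k : Nat => (x :: t)[(2 * (k : Int)).toNat]?) = (fun k => (x :: t)[2 * k]?) := by
      funext k; congr 1
    have hc : (((t.length : Int) + 1 + 2 - 1) / 2).toNat = ((x :: t).length + 1) / 2 := by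
      simp only [List.length_cons]; omega
    rw [hf, hc, pv_filterMap_range _ _ rfl]

theorem pv_slice2_tail (xs : List Int) :
    PySem.List.slice? xs (some 1) none 2 = some (pvEveryOther xs.tail) := by
  rcases xs with _ | ⟨x, t⟩
  · decide
  · simp only [PySem.List.slice?, PySem.List.sliceIndices]
    norm_num
    have hf : (fun k : Nat => (x :: t)[(1 + 2 * (k : Int)).toNat]?) = (fun k => t[2 * k]?) := by
      funext k
      have h1 : (1 + 2 * (k : Int)).toNat = 2 * k + 1 := by omega
      rw [h1, List.getElem?_cons_succ]
    have hc : (if 0 < t.length then (((t.length : Int) + 2 - 1) / 2).toNat else 0) = (t.length + 1) / 2 := by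
      split <;> omega
    rw [hf, hc, pv_filterMap_range _ _ rfl]

theorem pvLoopA_eq (xs t1 t2 : List Int) :
    pvLoopA xs t1 t2 = (t1 ++ pvEveryOther xs.tail, t2 ++ pvEveryOther xs) := by
  induction xs, t1, t2 using pvLoopA.induct with
  | case1 t1' t2' => simp [pvLoopA, pvEveryOther]
  | case2 x t1' t2' => simp [pvLoopA, pvEveryOther]
  | case3 x y rest t1' t2' ih =>
    rw [pvLoopA, ih]
    simp [pvEveryOther_cons]

-- ===== VERDICT (by name: the statement is the Claim_ definition above) =====
theorem matchmake_elo_from_elo_spec : Claim_equal_matchmake_elo_from_elo := by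
  intro players_elo _
  unfold Spec_matchmake_elo_from_elo matchmake_elo_from_elo matchmake_elo_from_elo_alt
  rw [pvLoopA_eq]
  simp only [pv_slice2_all, pv_slice2_tail, Option.getD_some, List.nil_append]
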